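-- pv_equiv track=rewrite | github.com/marekborowiec/spruceup | spruceup/spruceup.py | replace_missing_in_dict
-- ===== SOURCE A (Python) =====
-- def replace_missing_in_dict(parsed_aln_dict, data_type):
--     """Convert ambiguous and missing data to '?' before calculating distances."""
--     nt_missing_ambiguous_chars = [
--         'K',
--         'M',
--         'R',
--         'Y',
--         'S',
--         'W',
--         'B',
--         'V',
--         'H',
--         'D',
--         'X',
--         'N',
--         'O',
--     ]
--     aa_missing_ambiguous_chars = ['B', 'J', 'Z', 'X', '.', '*']
--     if data_type == 'aa':
--         new_dict = {
--             taxon: replace_missing_ambiguous(seq, aa_missing_ambiguous_chars)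
--             for taxon, seq in parsed_aln_dict.items()
--         }
--     elif data_type == 'nt':
--         new_dict = {
--             taxon: replace_missing_ambiguous(seq, nt_missing_ambiguous_chars)
--             for taxon, seq in parsed_aln_dict.items()
--         }
--     return new_dict
--
-- def replace_missing_ambiguous(seq, missing_ambiguous_list):
--     """Given sequence and list of missing or ambiguous characters,
--     replace them in sequence with '?'.
--     """
--     for char in missing_ambiguous_list:
--         seq = seq.replace(char, '?')
--     return seq
-- ===== SOURCE B (Python) =====
-- def replace_missing_in_dict(parsed_aln_dict, data_type):
--     """Convert ambiguous and missing data to '?' before calculating distances."""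
--     aa_set = frozenset('BJZX.*')
--     nt_set = frozenset('KMRYSWBVHDXNO')
--     if data_type == 'aa':
--         charset = aa_set
--     elif data_type == 'nt':
--         charset = nt_set
--     return {
--         taxon: ''.join('?' if c in charset else c for c in seq)
--         for taxon, seq in parsed_aln_dict.items()
--     }
-- ===== Notes on version B (the rewrite author's own statement) =====
-- stated objective: simpler
-- what changed: B replaces the helper's k sequential full-string str.replace passes (one per ambiguous character) by a single character-by-character pass per sequence with set membership, joining the result once.
-- outside the precondition, e.g. on replace_missing_in_dict({'t1': 'ACGT'}, 'protein'): A raises UnboundLocalError, B raises NameError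
import Mathlib
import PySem

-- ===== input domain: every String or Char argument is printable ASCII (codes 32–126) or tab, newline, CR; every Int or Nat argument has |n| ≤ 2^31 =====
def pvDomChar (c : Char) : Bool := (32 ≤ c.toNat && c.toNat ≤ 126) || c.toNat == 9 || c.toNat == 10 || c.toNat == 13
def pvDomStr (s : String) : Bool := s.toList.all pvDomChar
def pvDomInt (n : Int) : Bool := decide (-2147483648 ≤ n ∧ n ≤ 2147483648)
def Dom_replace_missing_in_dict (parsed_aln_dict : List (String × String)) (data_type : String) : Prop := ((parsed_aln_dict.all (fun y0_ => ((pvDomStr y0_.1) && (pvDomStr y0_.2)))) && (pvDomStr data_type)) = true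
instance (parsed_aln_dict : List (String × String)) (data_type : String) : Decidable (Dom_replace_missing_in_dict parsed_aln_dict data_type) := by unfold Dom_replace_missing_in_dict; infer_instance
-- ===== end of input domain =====

-- B replaces A's k sequential full-string str.replace passes per sequence by one
-- character-by-character pass with set membership; equivalence proved on data_type ∈ {"aa","nt"}.

-- ===== PORT A =====
-- helper replace_missing_ambiguous: for char in list: seq = seq.replace(char, '?')
def pvReplaceMissingAmbiguous (seq : String) (missing_ambiguous_list : List String) : String :=
  missing_ambiguous_list.foldl (fun s ch => PySem.Str.replace s ch "?") seq

def replace_missing_in_dict (parsed_aln_dict : List (String × String)) (data_type : String) : List (String × String) :=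
  let nt_missing_ambiguous_chars : List String :=
    ["K", "M", "R", "Y", "S", "W", "B", "V", "H", "D", "X", "N", "O"]
  let aa_missing_ambiguous_chars : List String := ["B", "J", "Z", "X", ".", "*"]
  let items := (PySem.Dict.ofList parsed_aln_dict).items  -- parsed_aln_dict.items()
  if data_type = "aa" then
    items.map (fun p => (p.1, pvReplaceMissingAmbiguous p.2 aa_missing_ambiguous_chars))
  else if data_type = "nt" then
    items.map (fun p => (p.1, pvReplaceMissingAmbiguous p.2 nt_missing_ambiguous_chars))
  else []  -- Python raises UnboundLocalError here; excluded by Pre_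

-- ===== PORT B =====
def replace_missing_in_dict_alt (parsed_aln_dict : List (String × String)) (data_type : String) : List (String × String) :=
  let aa_set : PySem.Set Char := PySem.Set.ofList ['B', 'J', 'Z', 'X', '.', '*']
  let nt_set : PySem.Set Char := PySem.Set.ofList ['K', 'M', 'R', 'Y', 'S', 'W', 'B', 'V', 'H', 'D', 'X', 'N', 'O']
  let charset? : Option (PySem.Set Char) :=
    if data_type = "aa" then some aa_set
    else if data_type = "nt" then some nt_set
    else none  -- charset unbound: Python raises UnboundLocalError; excluded by Pre_
  match charset? with
  | some charset =>
      (PySem.Dict.ofList parsed_aln_dict).items.map (fun p =>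
        (p.1, String.ofList (p.2.toList.map (fun c => if charset.contains c then '?' else c))))
  | none => []

-- ===== PRECONDITION & SPEC =====
-- Pre_ excludes data_type other than "aa"/"nt", on which A raises UnboundLocalError.
def Pre_replace_missing_in_dict (parsed_aln_dict : List (String × String)) (data_type : String) : Prop :=
  data_type = "aa" ∨ data_type = "nt"
instance (parsed_aln_dict : List (String × String)) (data_type : String) : Decidable (Pre_replace_missing_in_dict parsed_aln_dict data_type) := by unfold Pre_replace_missing_in_dict; infer_instance

def pvWitness_replace_missing_in_dict : (List (String × String)) × String :=
  ([("t1", "ACGNX"), ("t2", "B.Z*")], "aa")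

def Spec_replace_missing_in_dict (parsed_aln_dict : List (String × String)) (data_type : String) (out : List (String × String)) : Prop := out = replace_missing_in_dict_alt parsed_aln_dict data_type
instance (parsed_aln_dict : List (String × String)) (data_type : String) (out : List (String × String)) : Decidable (Spec_replace_missing_in_dict parsed_aln_dict data_type out) := by unfold Spec_replace_missing_in_dict; infer_instance

-- ===== CLAIM (what is proved, stated in full; the proofs are below) =====
def Claim_equal_replace_missing_in_dict : Prop := ∀ (parsed_aln_dict : List (String × String)) (data_type : String), Dom_replace_missing_in_dict parsed_aln_dict data_type → Pre_replace_missing_in_dict parsed_aln_dict data_type → Spec_replace_missing_in_dict parsed_aln_dict data_type (replace_missing_in_dict parsed_aln_dict data_type)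

-- ===== LEMMAS AND PROOFS =====

-- replace with a single-char pattern and single-char replacement is a character map
theorem pv_go_single (c q : Char) : ∀ (l acc : List Char) (fuel : Nat), l.length ≤ fuel →
    PySem.Chars.replace.go [c] [q] fuel l acc
      = acc.reverse ++ l.map (fun ch => if ch = c then q else ch) := by
  intro l
  induction l with
  | nil =>
    intro acc fuel _
    cases fuel <;> simp [PySem.Chars.replace.go]
  | cons c' t ih =>
    intro acc fuel hf
    cases fuel with
    | zero => simp at hf
    | succ fuel' =>
      by_cases h : c' = c
      · subst h
        have : List.isPrefixOf [c'] (c' :: t) = true := by simp [List.isPrefixOf]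
        simp only [PySem.Chars.replace.go, this, if_true]
        show PySem.Chars.replace.go [c'] [q] fuel' t (q :: acc) = _
        rw [ih (q :: acc) fuel' (by simpa using Nat.succ_le_succ_iff.mp hf)]
        simp
      · have : List.isPrefixOf [c] (c' :: t) = false := by
          simp [List.isPrefixOf]; exact fun hh => (h hh.symm).elim
        simp only [PySem.Chars.replace.go, this]
        rw [ih (c' :: acc) fuel' (by simpa using Nat.succ_le_succ_iff.mp hf)]
        simp [h]

theorem pv_replace_single (s : List Char) (c q : Char) :
    PySem.Chars.replace s [c] [q] = s.map (fun ch => if ch = c then q else ch) := by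
  simp [PySem.Chars.replace]
  rw [pv_go_single c q s [] s.length (le_refl _)]
  simp

-- A's sequential replace passes over singleton strings as one map of a fold of ifs
theorem pv_foldA_str (L : List Char) : ∀ (s : String),
    (L.map (fun c => String.ofList [c])).foldl (fun t p => PySem.Str.replace t p "?") s
      = String.ofList (s.toList.map (fun ch => L.foldl (fun x c => if x = c then '?' else x) ch)) := by
  induction L with
  | nil => intro s; simp
  | cons c L ih =>
    intro s
    simp only [List.map_cons, List.foldl_cons]
    rw [ih]
    have h1 : PySem.Str.replace s (String.ofList [c]) "?"
        = String.ofList (s.toList.map (fun ch => if ch = c then '?' else ch)) := by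
      simp [PySem.Str.replace, pv_replace_single]
    rw [h1]
    simp [List.map_map]
    rfl

-- a chain of single-char ifs equals one membership test (replacement char not in the list)
theorem pv_chainIf (L : List Char) (hq : '?' ∉ L) (ch : Char) :
    L.foldl (fun x c => if x = c then '?' else x) ch = if ch ∈ L then '?' else ch := by
  induction L generalizing ch with
  | nil => simp
  | cons c L ih =>
    have hq' : '?' ∉ L := fun h => hq (List.mem_cons_of_mem _ h)
    by_cases h : ch = c
    · subst h
      simp only [List.foldl_cons, if_pos rfl]
      rw [ih hq']
      simp
    · simp only [List.foldl_cons, if_neg h]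
      rw [ih hq']
      simp [List.mem_cons, h]


-- per-sequence agreement, parametrized over the character list
theorem pv_seq_eq (L : List Char) (hq : '?' ∉ L) (s : String) :
    pvReplaceMissingAmbiguous s (L.map (fun c => String.ofList [c]))
      = String.ofList (s.toList.map (fun c => if (PySem.Set.ofList L).contains c then '?' else c)) := by
  unfold pvReplaceMissingAmbiguous
  rw [pv_foldA_str]
  congr 1
  apply List.map_congr_left
  intro ch _
  rw [pv_chainIf L hq ch]
  have hmem : (PySem.Set.ofList L).contains ch = true ↔ ch ∈ L := by
    simp [PySem.Set.mem_ofList]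
  by_cases h : ch ∈ L
  · simp [h, hmem.mpr h]
  · simp [h, fun hc => h (hmem.mp hc)]

-- ===== VERDICT (by name: the statement is the Claim_ definition above) =====
theorem replace_missing_in_dict_spec : Claim_equal_replace_missing_in_dict := by
  intro d dt _ hpre
  unfold Spec_replace_missing_in_dict replace_missing_in_dict replace_missing_in_dict_alt
  rcases hpre with h | h <;> subst h <;> simp only [reduceIte] <;>
    apply List.map_congr_left <;> intro p _ <;> refine congrArg _ ?_
  · have := pv_seq_eq ['B', 'J', 'Z', 'X', '.', '*'] (by decide) p.2
    simpa using this
  · have := pv_seq_eq ['K', 'M', 'R', 'Y', 'S', 'W', 'B', 'V', 'H', 'D', 'X', 'N', 'O'] (by decide) p.2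
    simpa using this
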